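-- pv_equiv track=rewrite | github.com/mlukacsko/GaTech | CS7637_KBAI/Mini Project 4/MonsterClassificationAgent/MonsterClassificationAgent.py | solve
-- ===== SOURCE A (Python) =====
-- def solve(samples, new_monster):
--     #Add your code here!
--     #
--     #The first parameter to this method will be a labeled list of samples in the form of
--     #a list of 2-tuples. The first item in each 2-tuple will be a dictionary representing
--     #the parameters of a particular monster. The second item in each 2-tuple will be a
--     #boolean indicating whether this is an example of this species or not.
--     #
--     #The second parameter will be a dictionary representing a newly observed monster.
--     #
--     #Your function should return True or False as a guess as to whether or not this new
--     #monster is an instance of the same species as that represented by the list.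
--     # pass
--
--     positive_features = {}
--     negative_features = {}
--
--     for monster, is_positive in samples:
--         target_dict = positive_features if is_positive else negative_features
--
--         for key, value in monster.items():
--             if key not in target_dict:
--                 target_dict[key] = set()
--             target_dict[key].add(value)
--
--     positive_matches = 0
--     negative_matches = 0
--
--     for key, value in new_monster.items():
--         if key in positive_features and value in positive_features[key]:
--             positive_matches += 1
--         if key in negative_features and value in negative_features[key]:
--             negative_matches += 1
--
--     if positive_matches >= negative_matches:
--         return True
--     else:
--         return False
-- ===== SOURCE B (Python) =====
-- def solve(samples, new_monster):
--     positive_matches = sum(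
--         1 for key, value in new_monster.items()
--         if any(label and monster.get(key) == value for monster, label in samples))
--     negative_matches = sum(
--         1 for key, value in new_monster.items()
--         if any(not label and monster.get(key) == value for monster, label in samples))
--     return positive_matches >= negative_matches
-- ===== Notes on version B (the rewrite author's own statement) =====
-- stated objective: simpler
-- what changed: B removes A's prebuilt positive/negative per-key value-set dictionaries and instead counts each new_monster feature by directly scanning the sample list with any(), comparing monster.get(key) to the value.
import Mathlib
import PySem

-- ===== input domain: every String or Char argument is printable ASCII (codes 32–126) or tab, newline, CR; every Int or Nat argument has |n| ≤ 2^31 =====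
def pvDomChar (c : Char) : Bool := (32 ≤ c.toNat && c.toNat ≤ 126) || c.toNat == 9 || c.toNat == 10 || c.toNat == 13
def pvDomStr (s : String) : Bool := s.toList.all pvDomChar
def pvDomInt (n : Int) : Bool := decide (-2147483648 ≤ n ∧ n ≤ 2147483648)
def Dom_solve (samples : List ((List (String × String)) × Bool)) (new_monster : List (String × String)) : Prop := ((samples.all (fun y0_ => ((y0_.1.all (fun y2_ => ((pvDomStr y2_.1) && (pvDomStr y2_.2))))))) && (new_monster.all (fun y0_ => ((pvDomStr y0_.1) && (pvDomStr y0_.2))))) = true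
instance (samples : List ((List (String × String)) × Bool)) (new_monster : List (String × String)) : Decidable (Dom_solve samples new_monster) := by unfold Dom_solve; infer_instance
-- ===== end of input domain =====

-- B drops A's prebuilt positive/negative value-set dictionaries and instead counts each
-- new_monster feature by directly scanning the sample list with `any`; return value only,
-- no observable mutation. Objective: simpler (no measured speedup claimed).

-- ===== PORT A =====
-- inner loop "for key, value in monster.items(): target_dict.setdefault(key, set()).add(value)"
def solveBuild (d : PySem.Dict String (PySem.Set String)) (monster : List (String × String)) :
    PySem.Dict String (PySem.Set String) :=
  (PySem.Dict.ofList monster).items.foldl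
    (fun d kv => d.modify kv.1 PySem.Set.empty (fun s => PySem.Set.add s kv.2)) d

def solve (samples : List ((List (String × String)) × Bool)) (new_monster : List (String × String)) : Bool :=
  let feats := samples.foldl
    (fun (st : PySem.Dict String (PySem.Set String) × PySem.Dict String (PySem.Set String)) s =>
      if s.2 then (solveBuild st.1 s.1, st.2) else (st.1, solveBuild st.2 s.1))
    (PySem.Dict.empty, PySem.Dict.empty)
  let counts := (PySem.Dict.ofList new_monster).items.foldl
    (fun (c : Int × Int) kv =>
      (if feats.1.contains kv.1 && PySem.Set.contains (feats.1.getD kv.1 PySem.Set.empty) kv.2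
         then c.1 + 1 else c.1,
       if feats.2.contains kv.1 && PySem.Set.contains (feats.2.getD kv.1 PySem.Set.empty) kv.2
         then c.2 + 1 else c.2))
    (0, 0)
  if counts.1 ≥ counts.2 then true else false

-- ===== PORT B =====
def solve_alt (samples : List ((List (String × String)) × Bool)) (new_monster : List (String × String)) : Bool :=
  let items := (PySem.Dict.ofList new_monster).items
  let positive_matches := items.countP
    (fun kv => samples.any (fun s => s.2 && ((PySem.Dict.ofList s.1).get? kv.1 == some kv.2)))
  let negative_matches := items.countP
    (fun kv => samples.any (fun s => !s.2 && ((PySem.Dict.ofList s.1).get? kv.1 == some kv.2)))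
  decide (positive_matches ≥ negative_matches)

-- ===== PRECONDITION & SPEC =====
def Spec_solve (samples : List ((List (String × String)) × Bool)) (new_monster : List (String × String)) (out : Bool) : Prop := out = solve_alt samples new_monster
instance (samples : List ((List (String × String)) × Bool)) (new_monster : List (String × String)) (out : Bool) : Decidable (Spec_solve samples new_monster out) := by unfold Spec_solve; infer_instance

-- ===== CLAIM (what is proved, stated in full; the proofs are below) =====
def Claim_equal_solve : Prop := ∀ (samples : List ((List (String × String)) × Bool)) (new_monster : List (String × String)), Dom_solve samples new_monster → Spec_solve samples new_monster (solve samples new_monster)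

-- ===== LEMMAS AND PROOFS =====

-- A's membership test: the `key in dict` guard is redundant given default ∅.
lemma hit_guard (d : PySem.Dict String (PySem.Set String)) (k v : String) :
    (d.contains k && PySem.Set.contains (d.getD k PySem.Set.empty) v)
      = PySem.Set.contains (d.getD k PySem.Set.empty) v := by
  cases h : d.contains k with
  | true => simp
  | false =>
    rw [PySem.Dict.getD_of_not_contains d PySem.Set.empty h]
    simp [PySem.Set.empty, PySem.Set.contains]

lemma contains_add (s : PySem.Set String) (x y : String) :
    PySem.Set.contains (PySem.Set.add s x) y = (PySem.Set.contains s y || (y == x)) := by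
  rw [Bool.eq_iff_iff]
  simp [PySem.Set.mem_add]

-- value-set membership after the inner item loop
lemma foldl_modify_contains (items : List (String × String))
    (d : PySem.Dict String (PySem.Set String)) (k v : String) :
    PySem.Set.contains
        ((items.foldl (fun d kv => d.modify kv.1 PySem.Set.empty (fun s => PySem.Set.add s kv.2)) d).getD
          k PySem.Set.empty) v
      = (PySem.Set.contains (d.getD k PySem.Set.empty) v
          || items.any (fun kv => kv.1 == k && kv.2 == v)) := by
  induction items generalizing d with
  | nil => simp
  | cons kv rest ih =>
    simp only [List.foldl_cons, List.any_cons, ih]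
    by_cases hk : k = kv.1
    · subst hk
      rw [PySem.Dict.getD_modify, if_pos rfl, contains_add]
      rw [Bool.eq_iff_iff]
      simp only [Bool.or_eq_true, Bool.and_eq_true, beq_iff_eq, beq_self_eq_true, true_and]
      constructor
      · rintro ((h | h) | h)
        · exact Or.inl h
        · exact Or.inr (Or.inl h.symm)
        · exact Or.inr (Or.inr h)
      · rintro (h | h | h)
        · exact Or.inl (Or.inl h)
        · exact Or.inl (Or.inr h.symm)
        · exact Or.inr h
    · rw [PySem.Dict.getD_modify]
      simp only [if_neg hk]
      have : (kv.1 == k) = false := by simp [Ne.symm hk]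
      simp [this]

-- the item-scan over a dict's items is exactly a successful lookup
lemma any_items_eq_get? (l : List (String × String)) (k v : String) :
    ((PySem.Dict.ofList l).items.any (fun kv => kv.1 == k && kv.2 == v))
      = ((PySem.Dict.ofList l).get? k == some v) := by
  rw [Bool.eq_iff_iff]
  simp only [List.any_eq_true, Bool.and_eq_true, beq_iff_eq]
  constructor
  · rintro ⟨⟨k', v'⟩, hmem, h1, h2⟩
    subst h1; subst h2
    simp [(PySem.Dict.get?_eq_some_iff_mem_items _ _ _ (PySem.Dict.nodup_keys_ofList l)).2 hmem]
  · intro h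
    refine ⟨(k, v), PySem.Dict.mem_items_of_get?_eq_some _ ?_, rfl, rfl⟩
    simpa using h

lemma build_contains (l : List (String × String))
    (d : PySem.Dict String (PySem.Set String)) (k v : String) :
    PySem.Set.contains ((solveBuild d l).getD k PySem.Set.empty) v
      = (PySem.Set.contains (d.getD k PySem.Set.empty) v
          || ((PySem.Dict.ofList l).get? k == some v)) := by
  rw [solveBuild, foldl_modify_contains, any_items_eq_get?]

-- the outer sample loop, both accumulators at once
lemma samples_fold (samples : List ((List (String × String)) × Bool))
    (p n : PySem.Dict String (PySem.Set String)) (k v : String) :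
    (PySem.Set.contains
        ((samples.foldl
            (fun (st : PySem.Dict String (PySem.Set String) × PySem.Dict String (PySem.Set String)) s =>
              if s.2 then (solveBuild st.1 s.1, st.2) else (st.1, solveBuild st.2 s.1))
            (p, n)).1.getD k PySem.Set.empty) v
        = (PySem.Set.contains (p.getD k PySem.Set.empty) v
            || samples.any (fun s => s.2 && ((PySem.Dict.ofList s.1).get? k == some v))))
    ∧ (PySem.Set.contains
        ((samples.foldl
            (fun (st : PySem.Dict String (PySem.Set String) × PySem.Dict String (PySem.Set String)) s =>
              if s.2 then (solveBuild st.1 s.1, st.2) else (st.1, solveBuild st.2 s.1))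
            (p, n)).2.getD k PySem.Set.empty) v
        = (PySem.Set.contains (n.getD k PySem.Set.empty) v
            || samples.any (fun s => !s.2 && ((PySem.Dict.ofList s.1).get? k == some v)))) := by
  induction samples generalizing p n with
  | nil => simp
  | cons s rest ih =>
    cases hs : s.2 with
    | true =>
      simp only [List.foldl_cons, List.any_cons, hs, reduceIte, Bool.true_and, Bool.not_true,
        Bool.false_and, Bool.false_or]
      rcases ih (solveBuild p s.1) n with ⟨h1, h2⟩
      refine ⟨?_, h2⟩
      rw [h1, build_contains, Bool.or_assoc, Bool.or_comm ((PySem.Dict.ofList s.1).get? k == some v)]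
    | false =>
      simp only [List.foldl_cons, List.any_cons, hs, Bool.false_and, Bool.false_or,
        Bool.not_false, Bool.true_and]
      rw [if_neg Bool.false_ne_true]
      rcases ih p (solveBuild n s.1) with ⟨h1, h2⟩
      refine ⟨h1, ?_⟩
      rw [h2, build_contains, Bool.or_assoc, Bool.or_comm ((PySem.Dict.ofList s.1).get? k == some v)]

-- A's counting loop: two independent counters over one pass
lemma count_pair (P N : (String × String) → Bool) (items : List (String × String)) (a b : Int) :
    items.foldl (fun (c : Int × Int) kv =>
        (if P kv then c.1 + 1 else c.1, if N kv then c.2 + 1 else c.2)) (a, b)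
      = (a + (items.countP P : Int), b + (items.countP N : Int)) := by
  induction items generalizing a b with
  | nil => simp
  | cons kv rest ih =>
    simp only [List.foldl_cons, List.countP_cons, ih]
    split_ifs <;> push_cast <;> ring_nf

-- final comparison: Int-counter test vs Nat decide
lemma final_cmp (p n : Nat) : (if (0:Int) + p ≥ 0 + n then true else false) = decide (p ≥ n) := by
  by_cases h : n ≤ p
  · have h' : ((n:Int) ≤ (p:Int)) := by exact_mod_cast h
    simp [h, h']
  · have h' : ¬((n:Int) ≤ (p:Int)) := by exact_mod_cast h
    simp [ge_iff_le, h, h']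

-- ===== VERDICT (by name: the statement is the Claim_ definition above) =====
theorem solve_spec : Claim_equal_solve := by
  intro samples new_monster _
  show solve samples new_monster = solve_alt samples new_monster
  unfold solve solve_alt
  simp only []
  rw [count_pair]
  have hP : ∀ kv : String × String,
      ((samples.foldl
          (fun (st : PySem.Dict String (PySem.Set String) × PySem.Dict String (PySem.Set String)) s =>
            if s.2 then (solveBuild st.1 s.1, st.2) else (st.1, solveBuild st.2 s.1))
          (PySem.Dict.empty, PySem.Dict.empty)).1.contains kv.1
        && PySem.Set.contains
            ((samples.foldl
                (fun (st : PySem.Dict String (PySem.Set String) × PySem.Dict String (PySem.Set String)) s =>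
                  if s.2 then (solveBuild st.1 s.1, st.2) else (st.1, solveBuild st.2 s.1))
                (PySem.Dict.empty, PySem.Dict.empty)).1.getD kv.1 PySem.Set.empty) kv.2)
      = samples.any (fun s => s.2 && ((PySem.Dict.ofList s.1).get? kv.1 == some kv.2)) := by
    intro kv
    rw [hit_guard, (samples_fold samples PySem.Dict.empty PySem.Dict.empty kv.1 kv.2).1]
    simp [PySem.Set.empty, PySem.Set.contains]
  have hN : ∀ kv : String × String,
      ((samples.foldl
          (fun (st : PySem.Dict String (PySem.Set String) × PySem.Dict String (PySem.Set String)) s =>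
            if s.2 then (solveBuild st.1 s.1, st.2) else (st.1, solveBuild st.2 s.1))
          (PySem.Dict.empty, PySem.Dict.empty)).2.contains kv.1
        && PySem.Set.contains
            ((samples.foldl
                (fun (st : PySem.Dict String (PySem.Set String) × PySem.Dict String (PySem.Set String)) s =>
                  if s.2 then (solveBuild st.1 s.1, st.2) else (st.1, solveBuild st.2 s.1))
                (PySem.Dict.empty, PySem.Dict.empty)).2.getD kv.1 PySem.Set.empty) kv.2)
      = samples.any (fun s => !s.2 && ((PySem.Dict.ofList s.1).get? kv.1 == some kv.2)) := by
    intro kv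
    rw [hit_guard, (samples_fold samples PySem.Dict.empty PySem.Dict.empty kv.1 kv.2).2]
    simp [PySem.Set.empty, PySem.Set.contains]
  simp only [hP, hN]
  exact final_cmp _ _
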